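-- pv_equiv track=rewrite | github.com/YanJiang332/Private | code/caiji/device info new.py | parse_table_data
-- ===== SOURCE A (Python) =====
-- def parse_table_data(paragraph, fields):
--     table_data = []
--     fields_lower = [field.lower() for field in fields]  # 转换为小写
--
--     if paragraph is not None:
--         entries = paragraph.split("***")
--         for entry in entries:
--             if not entry.strip():
--                 continue
--             data = {field: [] for field in fields_lower}
--             lines = entry.split("\n")
--             for line in lines:
--                 parts = line.split(" : ")
--                 if len(parts) == 2:
--                     field_name = parts[0].strip().lower()  # 转换为小写
--                     field_value = parts[1].strip()
--                     if field_name in data: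
--                         data[field_name].append(field_value)
--
--             prev_data = {}
--             for i in range(max(len(data[field]) for field in fields_lower)):
--                 new_data = {}
--                 for field in fields:
--                     lower_field = field.lower()
--                     if i < len(data[lower_field]):
--                         new_data[field] = data[lower_field][i]
--                         prev_data[lower_field] = data[lower_field][i]
--                     else:
--                         new_data[field] = prev_data.get(lower_field, "")
--                 table_data.append(new_data)
--     return table_data
-- ===== SOURCE B (Python) =====
-- def parse_table_data(paragraph, fields):
--     table_data = []
--     fields_lower = [field.lower() for field in fields]
--     if paragraph is None:
--         return table_data
--     for entry in paragraph.split("***"):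
--         if not entry.strip():
--             continue
--         data = {f: [] for f in fields_lower}
--         for line in entry.split("\n"):
--             parts = line.split(" : ")
--             if len(parts) == 2:
--                 name = parts[0].strip().lower()
--                 if name in data:
--                     data[name].append(parts[1].strip())
--         rows = max(len(data[f]) for f in fields_lower)
--         padded = {
--             f: (col + [col[-1]] * (rows - len(col))) if col else [""] * rows
--             for f, col in ((f, data[f]) for f in fields_lower)
--         }
--         table_data.extend(
--             {field: padded[field.lower()][i] for field in fields} for i in range(rows)
--         )
--     return table_data
-- ===== Notes on version B (the rewrite author's own statement) =====
-- stated objective: alternative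
-- what changed: Row generation per entry is rewritten column-wise: instead of A's row-by-row index sweep that threads a mutable prev_data dict, B forward-fills each collected column once (pad with its last value, or all-empty) and then builds the rows by indexing the padded columns.
import Mathlib
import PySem

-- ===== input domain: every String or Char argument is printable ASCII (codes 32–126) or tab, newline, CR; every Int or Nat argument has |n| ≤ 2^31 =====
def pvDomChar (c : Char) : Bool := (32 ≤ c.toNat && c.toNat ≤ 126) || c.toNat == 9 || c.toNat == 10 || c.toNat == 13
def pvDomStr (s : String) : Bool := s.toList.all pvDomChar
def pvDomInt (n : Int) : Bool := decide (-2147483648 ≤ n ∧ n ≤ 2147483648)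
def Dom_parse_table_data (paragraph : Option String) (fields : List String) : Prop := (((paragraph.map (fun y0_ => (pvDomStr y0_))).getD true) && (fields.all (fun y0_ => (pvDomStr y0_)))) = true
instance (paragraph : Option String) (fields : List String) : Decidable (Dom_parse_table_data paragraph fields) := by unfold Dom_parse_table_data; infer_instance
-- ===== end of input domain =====

-- B replaces A's row-by-row sweep with a mutated prev_data dict by per-column
-- forward-fill followed by row assembly from the padded columns (objective: alternative).

-- ===== PORT A =====
-- s.split(sep) with a nonempty literal sep (PySem.Str.split? is none only for sep = "")
def pvSplit (s sep : String) : List String := (PySem.Str.split? s sep).getD []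

-- shared collection step (textually identical in both Pythons): data = {f: [] for f in fields_lower};
-- then every "name : value" line appends value to data[name] when name is a known field
def pvCollect (fields_lower : List String) (entry : String) : PySem.Dict String (List String) :=
  let d0 := fields_lower.foldl (fun d f => d.insert f ([] : List String)) PySem.Dict.empty
  (pvSplit entry "\n").foldl (fun d line =>
    let parts := pvSplit line " : "
    if parts.length = 2 then
      let field_name := PySem.Str.lower (PySem.Str.strip (parts.getD 0 ""))
      let field_value := PySem.Str.strip (parts.getD 1 "")
      if d.contains field_name then d.modify field_name [] (fun l => l ++ [field_value]) else d
    else d) d0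

-- max(len(data[field]) for field in fields_lower); Python raises ValueError on empty fields (excluded by Pre_)
def pvMaxLen (fields_lower : List String) (data : PySem.Dict String (List String)) : Nat :=
  (fields_lower.map (fun f => (data.getD f []).length)).foldl max 0

-- one field of A's inner row loop: build new_data (st.1) and update prev_data (st.2)
def pvStepA (data : PySem.Dict String (List String)) (i : Int)
    (st : PySem.Dict String String × PySem.Dict String String) (field : String) :
    PySem.Dict String String × PySem.Dict String String :=
  let lf := PySem.Str.lower field
  let col := (data.getD lf [] : List String)
  if i < (col.length : Int) then
    (st.1.insert field (PySem.List.pyGet? col i |>.getD ""),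
     st.2.insert lf (PySem.List.pyGet? col i |>.getD ""))
  else
    (st.1.insert field (st.2.getD lf ""), st.2)

def parse_table_data (paragraph : Option String) (fields : List String) : List (List (String × String)) :=
  let fields_lower := fields.map PySem.Str.lower
  match paragraph with
  | none => []
  | some p =>
    (pvSplit p "***").foldl (fun table_data entry =>
      if PySem.Str.strip entry = "" then table_data
      else
        let data := pvCollect fields_lower entry
        let R := pvMaxLen fields_lower data
        ((PySem.List.pyRange 0 (R : Int) 1).foldl
          (fun (acc : List (List (String × String)) × PySem.Dict String String) i =>
            let step := fields.foldl (pvStepA data i) (PySem.Dict.empty, acc.2)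
            (acc.1 ++ [step.1.items], step.2))
          (table_data, PySem.Dict.empty)).1) []

-- ===== PORT B =====
def parse_table_data_alt (paragraph : Option String) (fields : List String) : List (List (String × String)) :=
  let fields_lower := fields.map PySem.Str.lower
  match paragraph with
  | none => []
  | some p =>
    ((pvSplit p "***").filter (fun e => !(PySem.Str.strip e == ""))).flatMap (fun entry =>
      let data := pvCollect fields_lower entry
      let rows := pvMaxLen fields_lower data
      let padded := fields_lower.foldl (fun pd f =>
        let col := (data.getD f [] : List String)
        pd.insert f (if col = [] then PySem.List.pyRepeat [""] (rows : Int)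
                     else col ++ PySem.List.pyRepeat [PySem.List.pyGet? col (-1) |>.getD ""] ((rows : Int) - (col.length : Int))))
        PySem.Dict.empty
      (List.range rows).map (fun i =>
        (fields.foldl (fun nd field =>
          nd.insert field ((padded.getD (PySem.Str.lower field) []).getD i ""))
          PySem.Dict.empty).items))

-- ===== PRECONDITION & SPEC =====
-- Pre_ excludes exactly the inputs on which A raises ValueError: fields = [] while some
-- entry of the paragraph has non-whitespace content (max() over an empty generator).
def Pre_parse_table_data (paragraph : Option String) (fields : List String) : Prop :=
  fields ≠ [] ∨
    ((paragraph.map (fun p => (pvSplit p "***").all (fun e => PySem.Str.strip e == ""))).getD true) = true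
instance (paragraph : Option String) (fields : List String) : Decidable (Pre_parse_table_data paragraph fields) := by unfold Pre_parse_table_data; infer_instance

def pvWitness_parse_table_data : Option String × List String := (some "Name : alice\nid : 7\n***\nname : bob", ["Name", "Id"])

def Spec_parse_table_data (paragraph : Option String) (fields : List String) (out : List (List (String × String))) : Prop := out = parse_table_data_alt paragraph fields
instance (paragraph : Option String) (fields : List String) (out : List (List (String × String))) : Decidable (Spec_parse_table_data paragraph fields out) := by unfold Spec_parse_table_data; infer_instance

-- ===== CLAIM (what is proved, stated in full; the proofs are below) =====
def Claim_equal_parse_table_data : Prop := ∀ (paragraph : Option String) (fields : List String), Dom_parse_table_data paragraph fields → Pre_parse_table_data paragraph fields → Spec_parse_table_data paragraph fields (parse_table_data paragraph fields)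

-- ===== LEMMAS AND PROOFS =====

-- last collected value of a column, "" for an empty column
def pvLastVal (col : List String) : String := if h : col = [] then "" else col.getLast h

-- forward-filled value of a column at row index i
def pvPadVal (col : List String) (i : Nat) : String :=
  if h : i < col.length then col[i] else pvLastVal col

-- a dict built by inserting g k at every k of a list answers g on the list's members
theorem pv_get?_foldl_insert {ν : Type} (l : List String) (g : String → ν)
    (d0 : PySem.Dict String ν) (k : String) :
    (l.foldl (fun d f => d.insert f (g f)) d0).get? k
      = if k ∈ l then some (g k) else d0.get? k := by
  induction l generalizing d0 with
  | nil => simp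
  | cons a rest ih =>
    simp only [List.foldl_cons, ih, List.mem_cons]
    by_cases hk : k ∈ rest
    · simp [hk]
    · by_cases hka : k = a
      · subst hka; simp [hk, PySem.Dict.get?_insert_self]
      · simp [hk, hka, PySem.Dict.get?_insert_of_ne _ _ hka]

-- A's inner row loop: new_data is the pvPadVal row, and prev_data afterwards answers
-- pvPadVal · i on every lowercased field of the list; other keys are untouched
theorem pv_rowfold (data : PySem.Dict String (List String)) (i : Nat) :
    ∀ (fs : List String) (nd prev : PySem.Dict String String),
      (∀ f ∈ fs, (data.getD (PySem.Str.lower f) []).length ≤ i →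
          prev.getD (PySem.Str.lower f) "" = pvLastVal (data.getD (PySem.Str.lower f) [])) →
      (fs.foldl (pvStepA data (i : Int)) (nd, prev)).1
        = fs.foldl (fun nd f => nd.insert f (pvPadVal (data.getD (PySem.Str.lower f) []) i)) nd
      ∧ (∀ f ∈ fs,
          ((fs.foldl (pvStepA data (i : Int)) (nd, prev)).2).getD (PySem.Str.lower f) ""
            = pvPadVal (data.getD (PySem.Str.lower f) []) i)
      ∧ (∀ k, (∀ f ∈ fs, PySem.Str.lower f ≠ k) →
          ((fs.foldl (pvStepA data (i : Int)) (nd, prev)).2).get? k = prev.get? k) := by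
  intro fs
  induction fs with
  | nil => exact fun nd prev h => ⟨rfl, by simp, fun k _ => rfl⟩
  | cons a rest ih =>
    intro nd prev h
    set lf := PySem.Str.lower a with hlf
    set col := (data.getD lf [] : List String) with hcol
    by_cases hlt : (i : Int) < (col.length : Int)
    · -- value taken from the column
      have hilen : i < col.length := by exact_mod_cast hlt
      have hstep : pvStepA data (i : Int) (nd, prev) a
          = (nd.insert a (pvPadVal col i), prev.insert lf (pvPadVal col i)) := by
        simp [pvStepA, ← hlf, ← hcol, hlt, pvPadVal, hilen, List.getElem?_eq_getElem hilen]
      have hrest := ih (nd.insert a (pvPadVal col i)) (prev.insert lf (pvPadVal col i)) ?_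
      · refine ⟨?_, ?_, ?_⟩
        · simpa [List.foldl_cons, hstep] using hrest.1
        · intro f hf
          rcases List.mem_cons.1 hf with hfa | hfr
          · subst hfa
            by_cases hmem : ∃ g ∈ rest, PySem.Str.lower g = lf
            · rcases hmem with ⟨g, hg, hgl⟩
              have := hrest.2.1 g hg
              simpa [List.foldl_cons, hstep, hgl, ← hlf, ← hcol] using this
            · push_neg at hmem
              have hfr := hrest.2.2 lf (fun g hg => hmem g hg)
              simp only [List.foldl_cons, hstep]
              simp only [← hlf, ← hcol]
              rw [PySem.Dict.getD, hfr, PySem.Dict.get?_insert_self]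
              rfl
          · simpa [List.foldl_cons, hstep] using hrest.2.1 f hfr
        · intro k hk
          have hka : lf ≠ k := hk a (List.mem_cons_self) 
          have := hrest.2.2 k (fun g hg => hk g (List.mem_cons_of_mem _ hg))
          simp only [List.foldl_cons, hstep] at this ⊢
          rw [this, PySem.Dict.get?_insert_of_ne _ _ (Ne.symm hka)]
      · intro f hf hlen
        by_cases hfl : PySem.Str.lower f = lf
        · exfalso
          rw [hfl, ← hcol] at hlen
          omega
        · rw [PySem.Dict.getD, PySem.Dict.get?_insert_of_ne _ _ hfl]
          exact h f (List.mem_cons_of_mem _ hf) hlen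
    · -- column exhausted: read prev_data
      have hilen : ¬ i < col.length := by exact_mod_cast hlt
      have hlen : col.length ≤ i := by omega
      have hpv : prev.getD lf "" = pvLastVal col := h a List.mem_cons_self hlen
      have hv : prev.getD lf "" = pvPadVal col i := by
        simp [pvPadVal, hilen, hpv]
      have hstep : pvStepA data (i : Int) (nd, prev) a
          = (nd.insert a (pvPadVal col i), prev) := by
        simp [pvStepA, ← hlf, ← hcol, hlt, hv]
      have hrest := ih (nd.insert a (pvPadVal col i)) prev
        (fun f hf hl => h f (List.mem_cons_of_mem _ hf) hl)
      refine ⟨by simpa [List.foldl_cons, hstep] using hrest.1, ?_, ?_⟩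
      · intro f hf
        rcases List.mem_cons.1 hf with hfa | hfr
        · subst hfa
          by_cases hmem : ∃ g ∈ rest, PySem.Str.lower g = lf
          · rcases hmem with ⟨g, hg, hgl⟩
            have := hrest.2.1 g hg
            simpa [List.foldl_cons, hstep, hgl, ← hlf, ← hcol] using this
          · push_neg at hmem
            have hfr := hrest.2.2 lf (fun g hg => hmem g hg)
            simp only [List.foldl_cons, hstep]
            rw [← hlf, ← hcol, PySem.Dict.getD, hfr]
            exact hv
        · simpa [List.foldl_cons, hstep] using hrest.2.1 f hfr
      · intro k hk
        have := hrest.2.2 k (fun g hg => hk g (List.mem_cons_of_mem _ hg))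
        simpa [List.foldl_cons, hstep] using this

theorem pv_padval_last (col : List String) (n : Nat) (h : col.length ≤ n + 1) :
    pvPadVal col n = pvLastVal col := by
  unfold pvPadVal
  split
  · rename_i hlt
    have hne : col ≠ [] := by intro hc; subst hc; simp at hlt
    have hn : n = col.length - 1 := by omega
    subst hn
    rw [pvLastVal]
    simp [hne, List.getLast_eq_getElem]
  · rfl

-- A's row loop over range(R) produces the forward-filled rows; prev_data satisfies the
-- forward-fill invariant after every prefix of rows
theorem pv_rows (fields : List String) (data : PySem.Dict String (List String)) (n : Nat) :
    ∀ (tbl : List (List (String × String))),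
      ((PySem.List.pyRange 0 (n : Int) 1).foldl
          (fun (acc : List (List (String × String)) × PySem.Dict String String) i =>
            let step := fields.foldl (pvStepA data i) (PySem.Dict.empty, acc.2)
            (acc.1 ++ [step.1.items], step.2))
          (tbl, PySem.Dict.empty)).1
        = tbl ++ (List.range n).map (fun i => (fields.foldl (fun nd f => nd.insert f (pvPadVal (data.getD (PySem.Str.lower f) []) i)) PySem.Dict.empty).items)
      ∧ (∀ f ∈ fields, (data.getD (PySem.Str.lower f) []).length ≤ n →
          (((PySem.List.pyRange 0 (n : Int) 1).foldl
              (fun (acc : List (List (String × String)) × PySem.Dict String String) i =>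
                let step := fields.foldl (pvStepA data i) (PySem.Dict.empty, acc.2)
                (acc.1 ++ [step.1.items], step.2))
              (tbl, PySem.Dict.empty)).2).getD (PySem.Str.lower f) ""
            = pvLastVal (data.getD (PySem.Str.lower f) [])) := by
  induction n with
  | zero =>
    intro tbl
    constructor
    · simp [PySem.List.pyRange_one_eq_nil (by omega : (0:Int) ≤ 0)]
    · intro f hf hlen
      have hcol : data.getD (PySem.Str.lower f) [] = [] :=
        List.eq_nil_of_length_eq_zero (by omega)
      simp only [PySem.List.pyRange_one_eq_nil (by omega : (0:Int) ≤ 0), List.foldl_nil]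
      rw [hcol]
      rfl
  | succ n ihn =>
    intro tbl
    have hsplit : PySem.List.pyRange 0 (((n : Nat) + 1 : Nat) : Int) 1
        = PySem.List.pyRange 0 (n : Int) 1 ++ [(n : Int)] := by
      push_cast
      exact PySem.List.pyRange_one_succ_right (by omega)
    obtain ⟨h1, h2⟩ := ihn tbl
    have hrow := pv_rowfold data n fields PySem.Dict.empty
      ((PySem.List.pyRange 0 (n : Int) 1).foldl
          (fun (acc : List (List (String × String)) × PySem.Dict String String) i =>
            let step := fields.foldl (pvStepA data i) (PySem.Dict.empty, acc.2)
            (acc.1 ++ [step.1.items], step.2))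
          (tbl, PySem.Dict.empty)).2 h2
    rw [hsplit]
    constructor
    · rw [List.foldl_append]
      simp only [List.foldl_cons, List.foldl_nil]
      rw [h1, hrow.1, List.range_succ, List.map_append]
      simp
    · intro f hf hlen
      rw [List.foldl_append]
      simp only [List.foldl_cons, List.foldl_nil]
      rw [hrow.2.1 f hf]
      exact pv_padval_last _ _ hlen

-- indexing B's padded column is pvPadVal
theorem pv_padcol_getD (col : List String) (R i : Nat) (hlen : col.length ≤ R) (hi : i < R) :
    (if col = [] then PySem.List.pyRepeat [""] (R : Int)
     else col ++ PySem.List.pyRepeat [PySem.List.pyGet? col (-1) |>.getD ""]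
            ((R : Int) - (col.length : Int))).getD i ""
      = pvPadVal col i := by
  by_cases hc : col = []
  · subst hc
    simp [PySem.List.pyRepeat_singleton, pvPadVal, pvLastVal, List.getD]
  · have hlast : (PySem.List.pyGet? col (-1) |>.getD "") = col.getLast hc := by
      rw [PySem.List.pyGet?_neg_one, List.getLast?_eq_getLast hc]
      rfl
    have hcast : ((R : Int) - (col.length : Int)).toNat = R - col.length := by omega
    rw [if_neg hc, hlast, PySem.List.pyRepeat_singleton, hcast]
    by_cases hil : i < col.length
    · rw [List.getD_eq_getElem?_getD, List.getElem?_append_left hil]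
      simp [pvPadVal, hil]
    · have hi2 : i - col.length < R - col.length := by omega
      rw [List.getD_eq_getElem?_getD, List.getElem?_append_right (by omega)]
      simp [hi2, pvPadVal, hil, pvLastVal, hc]

-- B's row i equals the forward-filled row (for i < R): padded-column indexing vs pvPadVal
theorem pv_rowB (fields : List String) (data : PySem.Dict String (List String)) (i : Nat)
    (hi : i < pvMaxLen (fields.map PySem.Str.lower) data) :
    (fields.foldl (fun nd field =>
        nd.insert field
          ((((fields.map PySem.Str.lower).foldl (fun pd f =>
              let col := (data.getD f [] : List String)
              pd.insert f (if col = [] then PySem.List.pyRepeat [""] ((pvMaxLen (fields.map PySem.Str.lower) data : Nat) : Int)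
                           else col ++ PySem.List.pyRepeat [PySem.List.pyGet? col (-1) |>.getD ""]
                                  (((pvMaxLen (fields.map PySem.Str.lower) data : Nat) : Int) - (col.length : Int))))
              PySem.Dict.empty).getD (PySem.Str.lower field) []).getD i ""))
        PySem.Dict.empty).items
      = (fields.foldl (fun nd f => nd.insert f (pvPadVal (data.getD (PySem.Str.lower f) []) i)) PySem.Dict.empty).items := by
  congr 1
  apply PySem.List.foldl_congr_mem
  intro nd field hfield
  congr 1
  have hmem : PySem.Str.lower field ∈ fields.map PySem.Str.lower :=
    List.mem_map_of_mem hfield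
  have hget := pv_get?_foldl_insert (fields.map PySem.Str.lower)
    (fun f => (if (data.getD f [] : List String) = [] then PySem.List.pyRepeat [""] ((pvMaxLen (fields.map PySem.Str.lower) data : Nat) : Int)
               else (data.getD f [] : List String) ++ PySem.List.pyRepeat [PySem.List.pyGet? (data.getD f [] : List String) (-1) |>.getD ""]
                      (((pvMaxLen (fields.map PySem.Str.lower) data : Nat) : Int) - ((data.getD f [] : List String).length : Int))))
    PySem.Dict.empty (PySem.Str.lower field)
  rw [if_pos hmem] at hget
  rw [PySem.Dict.getD, hget]
  simp only [Option.getD_some]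
  apply pv_padcol_getD
  · have := (PySem.List.le_foldl_max_nat ((fields.map PySem.Str.lower))
      (fun f => (data.getD f [] : List String).length) 0).2 _ hmem
    rw [pvMaxLen, List.foldl_map]
    exact this
  · exact hi

-- entries loop: conditional append of per-entry rows is filter + flatMap
theorem pv_foldl_entries (g : String → List (List (String × String))) :
    ∀ (l : List String) (acc : List (List (String × String))),
      l.foldl (fun acc e => if PySem.Str.strip e = "" then acc else acc ++ g e) acc
        = acc ++ (l.filter (fun e => !(PySem.Str.strip e == ""))).flatMap g := by
  intro l
  induction l with
  | nil => simp
  | cons a rest ih =>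
    intro acc
    by_cases ha : PySem.Str.strip a = "" <;>
      simp [ha, ih, List.append_assoc]


-- the two ports agree on the paragraph's entry list
theorem pv_entries_eq (fields : List String) (p : String) :
    (pvSplit p "***").foldl (fun table_data entry =>
      if PySem.Str.strip entry = "" then table_data
      else
        ((PySem.List.pyRange 0 ((pvMaxLen (fields.map PySem.Str.lower) (pvCollect (fields.map PySem.Str.lower) entry) : Nat) : Int) 1).foldl
          (fun (acc : List (List (String × String)) × PySem.Dict String String) i =>
            let step := fields.foldl (pvStepA (pvCollect (fields.map PySem.Str.lower) entry) i) (PySem.Dict.empty, acc.2)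
            (acc.1 ++ [step.1.items], step.2))
          (table_data, PySem.Dict.empty)).1) []
    = ((pvSplit p "***").filter (fun e => !(PySem.Str.strip e == ""))).flatMap (fun entry =>
        (List.range (pvMaxLen (fields.map PySem.Str.lower) (pvCollect (fields.map PySem.Str.lower) entry))).map (fun i =>
          (fields.foldl (fun nd field =>
            nd.insert field
              ((((fields.map PySem.Str.lower).foldl (fun pd f =>
                  let col := ((pvCollect (fields.map PySem.Str.lower) entry).getD f [] : List String)
                  pd.insert f (if col = [] then PySem.List.pyRepeat [""] ((pvMaxLen (fields.map PySem.Str.lower) (pvCollect (fields.map PySem.Str.lower) entry) : Nat) : Int)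
                               else col ++ PySem.List.pyRepeat [PySem.List.pyGet? col (-1) |>.getD ""]
                                      (((pvMaxLen (fields.map PySem.Str.lower) (pvCollect (fields.map PySem.Str.lower) entry) : Nat) : Int) - (col.length : Int))))
                  PySem.Dict.empty).getD (PySem.Str.lower field) []).getD i ""))
            PySem.Dict.empty).items)) := by
  rw [PySem.List.foldl_congr_mem (pvSplit p "***") _
    (fun table_data entry =>
      if PySem.Str.strip entry = "" then table_data
      else table_data ++
        (List.range (pvMaxLen (fields.map PySem.Str.lower) (pvCollect (fields.map PySem.Str.lower) entry))).map (fun i =>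
          (fields.foldl (fun nd field =>
            nd.insert field
              ((((fields.map PySem.Str.lower).foldl (fun pd f =>
                  let col := ((pvCollect (fields.map PySem.Str.lower) entry).getD f [] : List String)
                  pd.insert f (if col = [] then PySem.List.pyRepeat [""] ((pvMaxLen (fields.map PySem.Str.lower) (pvCollect (fields.map PySem.Str.lower) entry) : Nat) : Int)
                               else col ++ PySem.List.pyRepeat [PySem.List.pyGet? col (-1) |>.getD ""]
                                      (((pvMaxLen (fields.map PySem.Str.lower) (pvCollect (fields.map PySem.Str.lower) entry) : Nat) : Int) - (col.length : Int))))
                  PySem.Dict.empty).getD (PySem.Str.lower field) []).getD i ""))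
            PySem.Dict.empty).items)) [] ?_]
  · exact pv_foldl_entries _ (pvSplit p "***") []
  · intro acc entry _
    by_cases hs : PySem.Str.strip entry = ""
    · simp [hs]
    · simp only [if_neg hs]
      rw [(pv_rows fields (pvCollect (fields.map PySem.Str.lower) entry)
            (pvMaxLen (fields.map PySem.Str.lower) (pvCollect (fields.map PySem.Str.lower) entry)) acc).1]
      congr 1
      apply List.map_congr_left
      intro i hi
      exact (pv_rowB fields (pvCollect (fields.map PySem.Str.lower) entry) i (List.mem_range.1 hi)).symm


-- ===== VERDICT (by name: the statement is the Claim_ definition above) =====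
theorem parse_table_data_spec : Claim_equal_parse_table_data := by
  unfold Claim_equal_parse_table_data
  intro paragraph fields _ _
  unfold Spec_parse_table_data parse_table_data parse_table_data_alt
  cases paragraph with
  | none => rfl
  | some p => exact pv_entries_eq fields p
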